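-- pv_equiv track=rewrite | github.com/mozilla-it/fx-sentiment-analysis | support_functions.py | find_phrase_in_text
-- ===== SOURCE A (Python) =====
-- def find_word_pair_in_text(text, word1, word2, distance=5):
--     """
--     The function check if two words are present in the given text within the given distance
--     outputs:
--     - found: boolean, if the two words are found
--     indices as the word pair may present for more than once
--     """
--     found = False
--     for i in range(len(text)):
--         if text[i] == word1:  # Find the first word
--             for j in range(max(i - distance, 0), min(i + distance, len(text))):
--                 if text[j] == word2:  # Find the second word in the neighbours
--                     found = True
--                     return found
--     return found
--
-- def find_phrase_in_text(text, phrase):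
--     """
--     Phrase is given in a list of words
--     """
--     found = False
--     for i in range(len(phrase) - 1):
--         for j in range(i + 1, len(phrase)):
--             result = find_word_pair_in_text(text, phrase[i], phrase[j])
--             if result:
--                 found = True
--                 return found
--     return found
-- ===== SOURCE B (Python) =====
-- def find_phrase_in_text(text, phrase):
--     """
--     Phrase is given in a list of words
--     """
--     first = {}
--     last = {}
--     for k, w in enumerate(phrase):
--         if w not in first:
--             first[w] = k
--         last[w] = k
--     n = len(text)
--     for p, w in enumerate(text):
--         fw = first.get(w)
--         if fw is None:
--             continue
--         for q in range(max(p - 5, 0), min(p + 5, n)):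
--             lu = last.get(text[q])
--             if lu is not None and fw < lu:
--                 return True
--     return False
-- ===== Notes on version B (the rewrite author's own statement) =====
-- stated objective: faster
-- what changed: Replaces the O(P^2) loop over phrase pairs, each rescanning the whole text, by one dict pass recording each word's first/last phrase index and a single windowed pass over the text checking first[text[p]] < last[text[q]].
import Mathlib
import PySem

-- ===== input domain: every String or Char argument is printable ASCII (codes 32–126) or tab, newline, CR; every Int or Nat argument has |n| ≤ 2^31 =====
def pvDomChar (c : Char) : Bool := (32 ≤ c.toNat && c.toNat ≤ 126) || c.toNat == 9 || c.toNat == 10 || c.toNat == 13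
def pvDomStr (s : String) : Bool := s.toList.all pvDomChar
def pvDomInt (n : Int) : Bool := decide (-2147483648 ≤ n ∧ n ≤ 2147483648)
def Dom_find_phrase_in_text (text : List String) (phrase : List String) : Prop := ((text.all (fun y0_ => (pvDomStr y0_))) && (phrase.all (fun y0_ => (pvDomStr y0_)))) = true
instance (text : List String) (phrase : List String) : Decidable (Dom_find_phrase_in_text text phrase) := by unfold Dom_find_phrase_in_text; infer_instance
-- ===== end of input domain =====

-- B replaces A's quadratic loop over phrase pairs (each rescanning the whole text) by one pass
-- recording each word's first/last phrase index in dicts and a single windowed pass over the text.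

-- ===== PORT A =====
def find_word_pair_in_text (text : List String) (word1 word2 : String) (distance : Int) : Bool :=
  (PySem.List.pyRange 0 (text.length : Int) 1).any (fun i =>
    (PySem.List.pyGetD text i "" == word1) &&
    (PySem.List.pyRange (max (i - distance) 0) (min (i + distance) (text.length : Int)) 1).any
      (fun j => PySem.List.pyGetD text j "" == word2))

def find_phrase_in_text (text : List String) (phrase : List String) : Bool :=
  (PySem.List.pyRange 0 ((phrase.length : Int) - 1) 1).any (fun i =>
    (PySem.List.pyRange (i + 1) (phrase.length : Int) 1).any (fun j =>
      find_word_pair_in_text text (PySem.List.pyGetD phrase i "") (PySem.List.pyGetD phrase j "") 5))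

-- ===== PORT B =====
-- the first loop of Source B: first/last phrase index of every word
def pvFirstLast (phrase : List String) : PySem.Dict String Int × PySem.Dict String Int :=
  (PySem.List.enumerate phrase).foldl
    (fun fl kw =>
      ((if fl.1.contains kw.2 then fl.1 else fl.1.insert kw.2 kw.1), fl.2.insert kw.2 kw.1))
    (PySem.Dict.empty, PySem.Dict.empty)

def find_phrase_in_text_alt (text : List String) (phrase : List String) : Bool :=
  let fl := pvFirstLast phrase
  (PySem.List.enumerate text).any (fun pw =>
    match fl.1.get? pw.2 with
    | none => false
    | some fw =>
      (PySem.List.pyRange (max (pw.1 - 5) 0) (min (pw.1 + 5) (text.length : Int)) 1).any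
        (fun q =>
          match fl.2.get? (PySem.List.pyGetD text q "") with
          | none => false
          | some lu => decide (fw < lu)))

-- ===== PRECONDITION & SPEC =====
def Spec_find_phrase_in_text (text : List String) (phrase : List String) (out : Bool) : Prop := out = find_phrase_in_text_alt text phrase
instance (text : List String) (phrase : List String) (out : Bool) : Decidable (Spec_find_phrase_in_text text phrase out) := by unfold Spec_find_phrase_in_text; infer_instance

-- ===== CLAIM (what is proved, stated in full; the proofs are below) =====
def Claim_equal_find_phrase_in_text : Prop := ∀ (text : List String) (phrase : List String), Dom_find_phrase_in_text text phrase → Spec_find_phrase_in_text text phrase (find_phrase_in_text text phrase)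

-- ===== LEMMAS AND PROOFS =====

-- last index of w in xs (proof-side mirror of what Source B's `last` dict records)
def pvLastIdx? (xs : List String) (w : String) : Option Nat :=
  match xs with
  | [] => none
  | x :: t =>
    match pvLastIdx? t w with
    | some r => some (r + 1)
    | none => if x == w then some 0 else none

theorem pvLastIdx?_of_mem {xs : List String} {w : String} {j : Nat}
    (h : xs[j]? = some w) : ∃ r, pvLastIdx? xs w = some r ∧ j ≤ r := by
  induction xs generalizing j with
  | nil => simp at h
  | cons x t ih =>
    cases j with
    | zero =>
      simp at h
      cases hr : pvLastIdx? t w with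
      | some r => exact ⟨r + 1, by simp [pvLastIdx?, hr], by omega⟩
      | none => exact ⟨0, by simp [pvLastIdx?, hr, h], by omega⟩
    | succ j' =>
      simp at h
      obtain ⟨r, hr, hle⟩ := ih h
      exact ⟨r + 1, by simp [pvLastIdx?, hr], by omega⟩

theorem pvLastIdx?_eq_some {xs : List String} {w : String} {j : Nat}
    (h : pvLastIdx? xs w = some j) :
    xs[j]? = some w ∧ ∀ j', j < j' → xs[j']? ≠ some w := by
  induction xs generalizing j with
  | nil => simp [pvLastIdx?] at h
  | cons x t ih =>
    simp only [pvLastIdx?] at h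
    cases hr : pvLastIdx? t w with
    | some r =>
      rw [hr] at h
      obtain ⟨h1, h2⟩ := ih hr
      cases h
      refine ⟨by simpa using h1, ?_⟩
      intro j' hj'
      cases j' with
      | zero => omega
      | succ j'' => simpa using h2 j'' (by omega)
    | none =>
      rw [hr] at h
      by_cases hx : x = w
      · simp [hx] at h
        subst h
        refine ⟨by simp [hx], ?_⟩
        intro j' hj'
        cases j' with
        | zero => omega
        | succ j'' =>
          simp only [List.getElem?_cons_succ]
          intro hc
          obtain ⟨r, hr', _⟩ := pvLastIdx?_of_mem hc
          simp [hr] at hr'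
      · simp [hx] at h

-- characterization of the two dicts built by Source B's first loop
theorem pvFirstLast_fold_fst (xs : List String) (s : Int)
    (f0 l0 : PySem.Dict String Int) (w : String) :
    (((PySem.List.enumerate xs s).foldl
      (fun fl kw =>
        ((if fl.1.contains kw.2 then fl.1 else fl.1.insert kw.2 kw.1), fl.2.insert kw.2 kw.1))
      (f0, l0)).1.get? w) =
    match f0.get? w with
    | some k => some k
    | none => (xs.idxOf? w).map (fun i => s + i) := by
  induction xs generalizing s f0 l0 with
  | nil => cases h : f0.get? w <;> simp [PySem.List.enumerate_nil, h]
  | cons x t ih =>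
    rw [PySem.List.enumerate_cons, List.foldl_cons, ih]
    rcases eq_or_ne x w with hx | hx
    · subst hx
      cases h : f0.get? x with
      | some k =>
        have hc : f0.contains x = true := by
          rw [PySem.Dict.contains_eq_isSome_get?, h]; rfl
        simp [hc, h]
      | none =>
        have hc : f0.contains x = false := by
          rw [PySem.Dict.contains_eq_isSome_get?, h]; rfl
        simp [hc, PySem.Dict.get?_insert_self, List.idxOf?_cons]
    · have hget : (if f0.contains x then f0 else f0.insert x s).get? w = f0.get? w := by
        split
        · rfl
        · exact PySem.Dict.get?_insert_of_ne _ _ (Ne.symm hx)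
      rw [hget]
      cases h : f0.get? w with
      | some k => simp
      | none =>
        simp only [List.idxOf?_cons, beq_iff_eq, hx, if_false]
        cases hi : t.idxOf? w
        · simp
        · simp
          omega

theorem pvFirstLast_fold_snd (xs : List String) (s : Int)
    (f0 l0 : PySem.Dict String Int) (w : String) :
    (((PySem.List.enumerate xs s).foldl
      (fun fl kw =>
        ((if fl.1.contains kw.2 then fl.1 else fl.1.insert kw.2 kw.1), fl.2.insert kw.2 kw.1))
      (f0, l0)).2.get? w) =
    match pvLastIdx? xs w with
    | some j => some (s + j)
    | none => l0.get? w := by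
  induction xs generalizing s f0 l0 with
  | nil => cases h : l0.get? w <;> simp [PySem.List.enumerate_nil, pvLastIdx?, h]
  | cons x t ih =>
    rw [PySem.List.enumerate_cons, List.foldl_cons, ih]
    cases hr : pvLastIdx? t w with
    | some r =>
      simp only [pvLastIdx?, hr]
      congr 1
      push_cast
      omega
    | none =>
      simp only [pvLastIdx?, hr]
      rcases eq_or_ne x w with hx | hx
      · subst hx
        simp [PySem.Dict.get?_insert_self]
      · rw [PySem.Dict.get?_insert_of_ne _ _ (Ne.symm hx)]
        simp [hx]

theorem pvFirst_get (phrase : List String) (w : String) :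
    (pvFirstLast phrase).1.get? w = (phrase.idxOf? w).map (fun i => (i : Int)) := by
  unfold pvFirstLast
  rw [pvFirstLast_fold_fst]
  simp [PySem.Dict.get?_empty]

theorem pvLast_get (phrase : List String) (w : String) :
    (pvFirstLast phrase).2.get? w = (pvLastIdx? phrase w).map (fun j => (j : Int)) := by
  unfold pvFirstLast
  rw [pvFirstLast_fold_snd]
  cases h : pvLastIdx? phrase w <;> simp [PySem.Dict.get?_empty]

theorem pv_mem_enumerate {xs : List String} {s : Int} {pr : Int × String} :
    pr ∈ PySem.List.enumerate xs s ↔ ∃ p : Nat, pr.1 = s + p ∧ xs[p]? = some pr.2 := by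
  induction xs generalizing s with
  | nil => simp [PySem.List.enumerate_nil]
  | cons x t ih =>
    rw [PySem.List.enumerate_cons, List.mem_cons, ih]
    constructor
    · rintro (h | ⟨p, hp, hx⟩)
      · exact ⟨0, by simp [h], by simp [h]⟩
      · exact ⟨p + 1, by push_cast; omega, by simpa using hx⟩
    · rintro ⟨p, hp, hx⟩
      cases p with
      | zero =>
        obtain ⟨a, b⟩ := pr
        simp at hp hx
        left
        simp [hp, hx]
      | succ p' =>
        right
        exact ⟨p', by push_cast at hp ⊢; omega, by simpa using hx⟩

-- the common meaning of both programs
def pvGood (text phrase : List String) : Prop :=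
  ∃ p q i j : Nat, ((p : Int) - 5 ≤ (q : Int)) ∧ ((q : Int) < (p : Int) + 5) ∧ i < j ∧
    ∃ w u, text[p]? = some w ∧ text[q]? = some u ∧ phrase[i]? = some w ∧ phrase[j]? = some u

theorem pvA_iff (text phrase : List String) :
    find_phrase_in_text text phrase = true ↔ pvGood text phrase := by
  unfold find_phrase_in_text find_word_pair_in_text pvGood
  simp only [List.any_eq_true, PySem.List.mem_pyRange_one, Bool.and_eq_true, beq_iff_eq]
  constructor
  · rintro ⟨i, ⟨hi0, hi1⟩, j, ⟨hj0, hj1⟩, p, ⟨hp0, hp1⟩, hpw, q, ⟨hq0, hq1⟩, hqu⟩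
    refine ⟨p.toNat, q.toNat, i.toNat, j.toNat, by omega, by omega, by omega, ?_⟩
    refine ⟨PySem.List.pyGetD phrase i "", PySem.List.pyGetD phrase j "", ?_, ?_, ?_, ?_⟩
    · rw [← hpw, PySem.List.pyGetD_eq_getElem text "" (by omega) (by omega)]
      exact List.getElem?_eq_getElem (by omega)
    · rw [← hqu, PySem.List.pyGetD_eq_getElem text "" (by omega) (by omega)]
      exact List.getElem?_eq_getElem (by omega)
    · rw [PySem.List.pyGetD_eq_getElem phrase "" (by omega) (by omega)]
      exact List.getElem?_eq_getElem (by omega)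
    · rw [PySem.List.pyGetD_eq_getElem phrase "" (by omega) (by omega)]
      exact List.getElem?_eq_getElem (by omega)
  · rintro ⟨p, q, i, j, hw1, hw2, hij, w, u, hpw, hqu, hiw, hju⟩
    have hpl : p < text.length := (List.getElem?_eq_some_iff.mp hpw).1
    have hql : q < text.length := (List.getElem?_eq_some_iff.mp hqu).1
    have hil : i < phrase.length := (List.getElem?_eq_some_iff.mp hiw).1
    have hjl : j < phrase.length := (List.getElem?_eq_some_iff.mp hju).1
    refine ⟨(i : Int), ⟨by omega, by omega⟩, (j : Int), ⟨by omega, by omega⟩,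
      (p : Int), ⟨by omega, by omega⟩, ?_, (q : Int), ⟨by omega, by omega⟩, ?_⟩
    · rw [PySem.List.pyGetD_eq_getElem text "" (by omega) (by omega),
        PySem.List.pyGetD_eq_getElem phrase "" (by omega) (by omega)]
      simp only [Int.toNat_natCast]
      have h1 := (List.getElem?_eq_some_iff.mp hpw).2
      have h2 := (List.getElem?_eq_some_iff.mp hiw).2
      simp_all
    · rw [PySem.List.pyGetD_eq_getElem text "" (by omega) (by omega),
        PySem.List.pyGetD_eq_getElem phrase "" (by omega) (by omega)]
      simp only [Int.toNat_natCast]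
      have h1 := (List.getElem?_eq_some_iff.mp hqu).2
      have h2 := (List.getElem?_eq_some_iff.mp hju).2
      simp_all

theorem pvB_iff (text phrase : List String) :
    find_phrase_in_text_alt text phrase = true ↔ pvGood text phrase := by
  unfold find_phrase_in_text_alt
  simp only [List.any_eq_true]
  constructor
  · rintro ⟨pw, hmem, hpw⟩
    obtain ⟨p, hp1, hp2⟩ := pv_mem_enumerate.mp hmem
    rcases hf : (pvFirstLast phrase).1.get? pw.2 with _ | fw
    · rw [hf] at hpw; simp at hpw
    · rw [hf] at hpw
      simp only [List.any_eq_true, PySem.List.mem_pyRange_one] at hpw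
      obtain ⟨q, ⟨hq0, hq1⟩, hq2⟩ := hpw
      rw [pvFirst_get] at hf
      rcases hi : phrase.idxOf? pw.2 with _ | i0
      · rw [hi] at hf; simp at hf
      · rw [hi] at hf
        simp at hf
        obtain ⟨hi0l, hi0w, _⟩ := List.idxOf?_eq_some_iff.mp hi
        rcases hl : (pvFirstLast phrase).2.get? (PySem.List.pyGetD text q "") with _ | lu
        · rw [hl] at hq2; simp at hq2
        · rw [hl] at hq2
          simp only [decide_eq_true_eq] at hq2
          rw [pvLast_get] at hl
          rcases hj : pvLastIdx? phrase (PySem.List.pyGetD text q "") with _ | j0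
          · rw [hj] at hl; simp at hl
          · rw [hj] at hl
            simp at hl
            obtain ⟨hj0u, _⟩ := pvLastIdx?_eq_some hj
            refine ⟨p, q.toNat, i0, j0, by omega, by omega, by omega, pw.2,
              PySem.List.pyGetD text q "", hp2, ?_, ?_, hj0u⟩
            · rw [PySem.List.pyGetD_eq_getElem text "" (by omega) (by omega)]
              exact List.getElem?_eq_getElem (by omega)
            · rw [List.getElem?_eq_getElem hi0l]
              simp [hi0w]
  · rintro ⟨p, q, i, j, hw1, hw2, hij, w, u, hpw, hqu, hiw, hju⟩
    have hpl : p < text.length := (List.getElem?_eq_some_iff.mp hpw).1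
    have hql : q < text.length := (List.getElem?_eq_some_iff.mp hqu).1
    have hil : i < phrase.length := (List.getElem?_eq_some_iff.mp hiw).1
    -- first index of w
    have hwmem : w ∈ phrase := List.mem_of_getElem? hiw
    obtain ⟨i0, hi0⟩ := Option.isSome_iff_exists.mp (List.isSome_idxOf?.mpr hwmem)
    obtain ⟨hi0l, hi0w, hi0min⟩ := List.idxOf?_eq_some_iff.mp hi0
    have hi0le : i0 ≤ i := by
      by_contra hlt
      exact hi0min i (by omega) ((List.getElem?_eq_some_iff.mp hiw).2)
    -- last index of u
    obtain ⟨j0, hj0, hj0ge⟩ := pvLastIdx?_of_mem hju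
    refine ⟨((p : Int), w), pv_mem_enumerate.mpr ⟨p, by omega, hpw⟩, ?_⟩
    rw [show (pvFirstLast phrase).1.get? w = some (i0 : Int) by rw [pvFirst_get, hi0]; rfl]
    simp only [List.any_eq_true, PySem.List.mem_pyRange_one]
    refine ⟨(q : Int), ⟨by omega, by omega⟩, ?_⟩
    rw [show PySem.List.pyGetD text (q : Int) "" = u by
      rw [PySem.List.pyGetD_eq_getElem text "" (by omega) (by omega)]
      simp only [Int.toNat_natCast]
      exact (List.getElem?_eq_some_iff.mp hqu).2]
    rw [show (pvFirstLast phrase).2.get? u = some (j0 : Int) by rw [pvLast_get, hj0]; rfl]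
    simp only [decide_eq_true_eq]
    omega

-- ===== VERDICT (by name: the statement is the Claim_ definition above) =====
theorem find_phrase_in_text_spec : Claim_equal_find_phrase_in_text := by
  intro text phrase _
  unfold Spec_find_phrase_in_text
  have h := (pvA_iff text phrase).trans (pvB_iff text phrase).symm
  cases hA : find_phrase_in_text text phrase <;> cases hB : find_phrase_in_text_alt text phrase <;> simp_all
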